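-- pv_equiv track=rewrite | github.com/XhstormR/octoconda | scripts/rebalance_repos.py | _merge_letter_ranges
-- ===== SOURCE A (Python) =====
-- def _safe_range(start: str, end: str) -> str:
--     """Regex char-class range, splitting across the digit/letter boundary."""
--     if start == end:
--         return start
--     if start.isdigit() and not end.isdigit():
--         return f"0-9a-{end}"
--     return f"{start}-{end}"
--
-- def _merge_letter_ranges(parts: list[str]) -> list[str]:
--     """Merge consecutive single-letter parts into [a-z] ranges."""
--     if not parts:
--         return parts
--
--     result = []
--     run_start: str | None = None
--     run_end: str | None = None
--
--     for p in parts: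
--         if len(p) == 1 and p.isalnum():
--             if run_start is None:
--                 run_start = p
--                 run_end = p
--             elif ord(p) == ord(run_end) + 1:
--                 run_end = p
--             else:
--                 result.append(_format_range(run_start, run_end))
--                 run_start = p
--                 run_end = p
--         else:
--             if run_start is not None:
--                 result.append(_format_range(run_start, run_end))
--                 run_start = None
--                 run_end = None
--             result.append(p)
--
--     if run_start is not None:
--         result.append(_format_range(run_start, run_end))
--
--     return result
--
-- def _format_range(start: str, end: str) -> str:
--     if start == end:
--         return start
--     if ord(end) - ord(start) == 1:
--         return f"[{start}{end}]"
--     return f"[{_safe_range(start, end)}]"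
-- ===== SOURCE B (Python) =====
-- def _safe_range(start: str, end: str) -> str:
--     """Regex char-class range, splitting across the digit/letter boundary."""
--     if start == end:
--         return start
--     if start.isdigit() and not end.isdigit():
--         return f"0-9a-{end}"
--     return f"{start}-{end}"
--
-- def _format_range(start: str, end: str) -> str:
--     if start == end:
--         return start
--     if ord(end) - ord(start) == 1:
--         return f"[{start}{end}]"
--     return f"[{_safe_range(start, end)}]"
--
-- def _merge_letter_ranges(parts: list[str]) -> list[str]:
--     """Consume the maximal consecutive-alnum run at each position with a nested
--     scan (no run_start/run_end state or deferred flush carried between items)."""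
--     if not parts:
--         return parts
--     result = []
--     n = len(parts)
--     i = 0
--     while i < n:
--         p = parts[i]
--         i += 1
--         if len(p) == 1 and p.isalnum():
--             end = p
--             while i < n:
--                 q = parts[i]
--                 if len(q) == 1 and q.isalnum() and ord(q) == ord(end) + 1:
--                     end = q
--                     i += 1
--                 else:
--                     break
--             result.append(_format_range(p, end))
--         else:
--             result.append(p)
--     return result
-- ===== Notes on version B (the rewrite author's own statement) =====
-- stated objective: alternative
-- what changed: Replaced A's state-machine scan that carries run_start/run_end across iterations and flushes a pending run at each break and at the end with a run-consuming nested scan: the outer loop takes each position, and if it starts a run an inner scan greedily eats the whole maximal consecutive-alnum run and formats it immediately, so no pending-run state or end-of-loop flush exists.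
import Mathlib
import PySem

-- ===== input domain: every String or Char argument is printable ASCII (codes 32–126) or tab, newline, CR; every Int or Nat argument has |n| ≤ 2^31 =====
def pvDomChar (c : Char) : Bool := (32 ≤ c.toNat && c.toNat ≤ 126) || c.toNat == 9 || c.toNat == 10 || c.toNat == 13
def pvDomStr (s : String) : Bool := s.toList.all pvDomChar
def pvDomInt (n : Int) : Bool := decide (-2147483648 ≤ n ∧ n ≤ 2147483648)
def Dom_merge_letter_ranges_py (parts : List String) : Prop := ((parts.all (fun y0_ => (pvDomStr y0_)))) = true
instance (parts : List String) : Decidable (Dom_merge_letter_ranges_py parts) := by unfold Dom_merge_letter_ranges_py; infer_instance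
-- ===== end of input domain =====

-- B replaces A's state-machine scan (pending run_start/run_end, flush at breaks and at the
-- end) with a run-consuming nested scan that eats each maximal run eagerly (objective:
-- alternative, same cost).

-- ===== PORT A =====
-- shared module helpers (used verbatim by both Pythons)

-- ord(p) for a single-character string (only applied where the Python guarantees len == 1)
def pyOrd (s : String) : Nat := (s.toList.headD default).toNat

def safe_range (start e : String) : String :=
  if start == e then start
  else if PySem.Str.strIsdigit start && !(PySem.Str.strIsdigit e) then
    String.ofList ('0' :: '-' :: '9' :: 'a' :: '-' :: e.toList)
  else String.ofList (start.toList ++ '-' :: e.toList)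

def format_range (start e : String) : String :=
  if start == e then start
  else if (pyOrd e : Int) - (pyOrd start : Int) == 1 then
    String.ofList ('[' :: start.toList ++ e.toList ++ [']'])
  else String.ofList ('[' :: (safe_range start e).toList ++ [']'])

-- len(p) == 1 and p.isalnum()
def isRunChar (p : String) : Bool := PySem.Str.len p == 1 && PySem.Str.strIsalnum p

-- one iteration of A's for-loop over the state (result, run_start, run_end)
def stepA (st : List String × Option String × Option String) (p : String) :
    List String × Option String × Option String :=
  let (result, rs, re) := st
  if isRunChar p then
    match rs with
    | none => (result, some p, some p)
    | some s =>
      if pyOrd p == pyOrd (re.getD "") + 1 then (result, some s, some p)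
      else (result ++ [format_range s (re.getD "")], some p, some p)
  else
    match rs with
    | some s => (result ++ [format_range s (re.getD ""), p], none, none)
    | none => (result ++ [p], none, none)

def merge_letter_ranges_py (parts : List String) : List String :=
  if parts = [] then parts
  else
    let st := foldA parts
    match st.2.1 with
    | some s => st.1 ++ [format_range s (st.2.2.getD "")]
    | none => st.1
where foldA (parts : List String) : List String × Option String × Option String :=
  parts.foldl stepA ([], none, none)

-- ===== PORT B =====
-- B's inner while loop: starting from `last`, eat the consecutive-alnum run; returns
-- (final end, remaining suffix)
def takeRun (last : String) (parts : List String) : String × List String :=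
  match parts with
  | [] => (last, [])
  | q :: rest =>
    if isRunChar q && pyOrd q == pyOrd last + 1 then takeRun q rest
    else (last, q :: rest)

theorem takeRun_len_le (last : String) (parts : List String) :
    (takeRun last parts).2.length ≤ parts.length := by
  induction parts generalizing last with
  | nil => simp [takeRun]
  | cons q rest ih =>
    simp only [takeRun]
    split
    · exact le_trans (ih q) (Nat.le_succ _)
    · simp

-- B's outer while loop over the remaining suffix of parts
def mergeGo (parts : List String) : List String :=
  match parts with
  | [] => []
  | p :: ps =>
    if isRunChar p then
      format_range p (takeRun p ps).1 :: mergeGo (takeRun p ps).2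
    else p :: mergeGo ps
termination_by parts.length
decreasing_by
  · exact Nat.lt_succ_of_le (takeRun_len_le p ps)
  · simp

def merge_letter_ranges_py_alt (parts : List String) : List String :=
  if parts = [] then parts else mergeGo parts

-- ===== PRECONDITION & SPEC =====
def Spec_merge_letter_ranges_py (parts : List String) (out : List String) : Prop := out = merge_letter_ranges_py_alt parts
instance (parts : List String) (out : List String) : Decidable (Spec_merge_letter_ranges_py parts out) := by unfold Spec_merge_letter_ranges_py; infer_instance

-- ===== CLAIM (what is proved, stated in full; the proofs are below) =====
def Claim_equal_merge_letter_ranges_py : Prop := ∀ (parts : List String), Dom_merge_letter_ranges_py parts → Spec_merge_letter_ranges_py parts (merge_letter_ranges_py parts)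

-- ===== LEMMAS AND PROOFS =====

-- A's post-loop finalisation
def finishA (st : List String × Option String × Option String) : List String :=
  match st.2.1 with
  | some s => st.1 ++ [format_range s (st.2.2.getD "")]
  | none => st.1

-- unfolding equations for B's outer loop
theorem mergeGo_nil : mergeGo [] = [] := by rw [mergeGo]

theorem mergeGo_cons_run (p : String) (ps : List String) (hp : isRunChar p = true) :
    mergeGo (p :: ps) = format_range p (takeRun p ps).1 :: mergeGo (takeRun p ps).2 := by
  rw [mergeGo]; simp [hp]

theorem mergeGo_cons_not (p : String) (ps : List String) (hp : ¬ isRunChar p = true) :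
    mergeGo (p :: ps) = p :: mergeGo ps := by
  rw [mergeGo]; simp [hp]

-- the combined loop invariant: A's fold from a no-run state / an open-run (s, e) state
-- produces exactly B's run-consuming result
theorem fold_eq (ps : List String) :
    (∀ acc, finishA (ps.foldl stepA (acc, none, none)) = acc ++ mergeGo ps) ∧
    (∀ acc s e, finishA (ps.foldl stepA (acc, some s, some e)) =
      acc ++ format_range s (takeRun e ps).1 :: mergeGo (takeRun e ps).2) := by
  induction ps with
  | nil => simp [finishA, mergeGo_nil, takeRun]
  | cons p ps ih =>
    obtain ⟨ih1, ih2⟩ := ih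
    constructor
    · intro acc
      by_cases hp : isRunChar p = true
      · simp only [List.foldl_cons, stepA, hp, if_true]
        rw [ih2, mergeGo_cons_run p ps hp]
      · simp only [List.foldl_cons, stepA, hp, if_false, Bool.false_eq_true]
        rw [ih1, mergeGo_cons_not p ps hp]
        simp
    · intro acc s e
      by_cases hp : isRunChar p = true
      · by_cases hord : pyOrd p = pyOrd e + 1
        · have ht : takeRun e (p :: ps) = takeRun p ps := by
            simp [takeRun, hp, hord]
          simp only [List.foldl_cons, stepA, hp, if_true, Option.getD_some,
            beq_iff_eq, hord, ht]
          exact ih2 acc s p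
        · have ht : takeRun e (p :: ps) = (e, p :: ps) := by
            simp [takeRun, hp, hord]
          simp only [List.foldl_cons, stepA, hp, if_true, Option.getD_some,
            beq_iff_eq, ht]
          rw [if_neg hord, ih2, mergeGo_cons_run p ps hp]
          simp
      · have ht : takeRun e (p :: ps) = (e, p :: ps) := by
          simp [takeRun, hp]
        simp only [List.foldl_cons, stepA, hp, if_false, Option.getD_some, ht,
          Bool.false_eq_true]
        rw [ih1, mergeGo_cons_not p ps hp]
        simp

-- ===== VERDICT (by name: the statement is the Claim_ definition above) =====
theorem merge_letter_ranges_py_spec : Claim_equal_merge_letter_ranges_py := by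
  intro parts _
  unfold Spec_merge_letter_ranges_py merge_letter_ranges_py merge_letter_ranges_py_alt
  by_cases hnil : parts = []
  · simp [hnil]
  · simp only [hnil, if_false]
    have := (fold_eq parts).1 []
    simpa [merge_letter_ranges_py.foldA, finishA] using this
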